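-- pv_equiv track=rewrite | github.com/ZakirCodeArchitect/PakistanHigherCourtsSearchAndQASystem | backend/search_module/search_indexing/services/simple_ai_snippet_service.py | _extract_legal_content
-- ===== SOURCE A (Python) =====
-- def _extract_legal_content(document_content: str, query: str) -> str:
--     """Extract relevant legal content from document"""
--     if not document_content:
--         return ""
--
--     # Look for legal terms and proceedings
--     legal_indicators = [
--         'death sentence', 'jail appeal', 'conviction', 'bail', 'petition',
--         'order', 'judgment', 'hearing', 'trial', 'proceedings', 'court order',
--         'legal', 'law', 'statute', 'regulation', 'act', 'section'
--     ]
--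
--     # Find sentences with legal content
--     sentences = document_content.split('. ')
--     legal_sentences = []
--
--     for sentence in sentences:
--         sentence = sentence.strip()
--         if len(sentence) < 20:
--             continue
--
--         # Check if sentence contains legal terms
--         sentence_lower = sentence.lower()
--         if any(term in sentence_lower for term in legal_indicators):
--             legal_sentences.append(sentence)
--
--     # Return the most relevant legal sentence
--     if legal_sentences:
--         # Prioritize sentences with query terms
--         query_terms = query.lower().split()
--         for sentence in legal_sentences:
--             if any(term in sentence.lower() for term in query_terms):
--                 return sentence[:150] + "..." if len(sentence) > 150 else sentence
--
--         # Fallback to first legal sentence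
--         return legal_sentences[0][:150] + "..." if len(legal_sentences[0]) > 150 else legal_sentences[0]
--
--     return ""
-- ===== SOURCE B (Python) =====
-- def _extract_legal_content(document_content: str, query: str) -> str:
--     """Single pass over the sentences: return at the first query-matching legal
--     sentence, remembering the first legal sentence as fallback."""
--     legal_indicators = (
--         'death sentence', 'jail appeal', 'conviction', 'bail', 'petition',
--         'order', 'judgment', 'hearing', 'trial', 'proceedings', 'court order',
--         'legal', 'law', 'statute', 'regulation', 'act', 'section'
--     )
--
--     def clip(s):
--         return s[:150] + "..." if len(s) > 150 else s
--
--     query_terms = query.lower().split()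
--     first_legal = None
--     for raw in document_content.split('. '):
--         sentence = raw.strip()
--         if len(sentence) < 20:
--             continue
--         low = sentence.lower()
--         if any(term in low for term in legal_indicators):
--             if any(term in low for term in query_terms):
--                 return clip(sentence)
--             if first_legal is None:
--                 first_legal = sentence
--     return clip(first_legal) if first_legal is not None else ""
-- ===== Notes on version B (the rewrite author's own statement) =====
-- stated objective: simpler
-- what changed: Replaces A's two-phase design (build the full list of legal sentences, then rescan it for a query match, then fall back to its head) by a single pass over the sentences that returns at the first query-matching legal sentence while remembering only the first legal sentence as fallback.
import Mathlib
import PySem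

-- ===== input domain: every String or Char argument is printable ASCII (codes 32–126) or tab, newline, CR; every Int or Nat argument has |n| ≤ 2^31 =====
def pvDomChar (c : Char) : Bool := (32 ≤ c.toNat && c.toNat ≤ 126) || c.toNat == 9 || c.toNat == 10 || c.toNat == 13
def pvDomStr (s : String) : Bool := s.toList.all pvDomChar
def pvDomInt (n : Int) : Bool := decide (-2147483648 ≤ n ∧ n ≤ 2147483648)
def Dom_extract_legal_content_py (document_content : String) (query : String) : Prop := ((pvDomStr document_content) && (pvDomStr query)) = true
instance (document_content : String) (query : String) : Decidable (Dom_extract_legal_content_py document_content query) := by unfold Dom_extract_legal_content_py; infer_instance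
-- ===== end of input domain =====

-- B merges A's two phases (collect all legal sentences, then rescan for a query match,
-- then fall back to the head) into one pass that returns at the first query-matching
-- legal sentence and remembers only the first legal sentence as fallback (objective: simpler).


-- shared literal constant of both Pythons (the same tuple appears in Source A and Source B)
def pvIndicators : List String :=
  ["death sentence", "jail appeal", "conviction", "bail", "petition",
   "order", "judgment", "hearing", "trial", "proceedings", "court order",
   "legal", "law", "statute", "regulation", "act", "section"]

-- s[:150] + "..." if len(s) > 150 else s   (string concatenation done on the char lists, exact)
def pvClip (s : String) : String :=
  if 150 < PySem.Str.len s then String.ofList ((PySem.Str.slice s none (some 150)).toList ++ ("...".toList)) else s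

-- ===== PORT A =====
def extract_legal_content_py (document_content : String) (query : String) : String :=
  if document_content = "" then ""
  else
    -- document_content.split('. ')  (sep is non-empty, so split? is always `some`)
    let sentences := (PySem.Str.split? document_content ". ").getD []
    let legal_sentences := sentences.foldl (fun acc sentence =>
      let s := PySem.Str.strip sentence
      if PySem.Str.len s < 20 then acc
      else
        let sentence_lower := PySem.Str.lower s
        if pvIndicators.any (fun term => PySem.Str.isIn term sentence_lower) then acc ++ [s]
        else acc) []
    match legal_sentences with
    | [] => ""
    | first :: rest =>
      let query_terms := PySem.Str.split₀ (PySem.Str.lower query)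
      -- 'for sentence in legal_sentences: if any(...): return …' = first hit of find?
      match (first :: rest).find? (fun s => query_terms.any (fun term => PySem.Str.isIn term (PySem.Str.lower s))) with
      | some s => pvClip s
      | none => pvClip first

-- ===== PORT B =====
-- the single scan of Source B: early return on a query-matching legal sentence,
-- `firstLegal` is the `first_legal` variable
def pvGoB (qterms : List String) (firstLegal : Option String) : List String → String
  | [] =>
    match firstLegal with
    | some f => pvClip f
    | none => ""
  | raw :: rest =>
    let s := PySem.Str.strip raw
    if PySem.Str.len s < 20 then pvGoB qterms firstLegal rest
    else
      let low := PySem.Str.lower s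
      if pvIndicators.any (fun term => PySem.Str.isIn term low) then
        if qterms.any (fun term => PySem.Str.isIn term low) then pvClip s
        else pvGoB qterms (if firstLegal.isNone then some s else firstLegal) rest
      else pvGoB qterms firstLegal rest

def extract_legal_content_py_alt (document_content : String) (query : String) : String :=
  pvGoB (PySem.Str.split₀ (PySem.Str.lower query)) none
    ((PySem.Str.split? document_content ". ").getD [])

-- ===== PRECONDITION & SPEC =====
def Spec_extract_legal_content_py (document_content : String) (query : String) (out : String) : Prop := out = extract_legal_content_py_alt document_content query
instance (document_content : String) (query : String) (out : String) : Decidable (Spec_extract_legal_content_py document_content query out) := by unfold Spec_extract_legal_content_py; infer_instance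

-- ===== CLAIM (what is proved, stated in full; the proofs are below) =====
def Claim_equal_extract_legal_content_py : Prop := ∀ (document_content : String) (query : String), Dom_extract_legal_content_py document_content query → Spec_extract_legal_content_py document_content query (extract_legal_content_py document_content query)

-- ===== LEMMAS AND PROOFS =====

-- the contribution of one raw sentence: its stripped form if it is a legal sentence
def pvLegal? (raw : String) : Option String :=
  let s := PySem.Str.strip raw
  if PySem.Str.len s < 20 then none
  else
    let low := PySem.Str.lower s
    if pvIndicators.any (fun term => PySem.Str.isIn term low) then some s
    else none

-- A's legal_sentences list
def pvCollect (sents : List String) : List String := sents.filterMap pvLegal?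

def pvQPred (qterms : List String) (s : String) : Bool :=
  qterms.any (fun term => PySem.Str.isIn term (PySem.Str.lower s))

theorem pvCollect_cons (raw : String) (rest : List String) :
    pvCollect (raw :: rest) = (pvLegal? raw).toList ++ pvCollect rest := by
  unfold pvCollect
  rw [List.filterMap_cons]
  cases pvLegal? raw <;> simp

theorem pvStepA (acc : List String) (raw : String) :
    (let s := PySem.Str.strip raw
     if PySem.Str.len s < 20 then acc
     else
       let sentence_lower := PySem.Str.lower s
       if pvIndicators.any (fun term => PySem.Str.isIn term sentence_lower) then acc ++ [s]
       else acc) = acc ++ (pvLegal? raw).toList := by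
  unfold pvLegal?
  dsimp only
  split_ifs <;> simp

theorem pvFoldA_eq_collect (sents : List String) (acc : List String) :
    sents.foldl (fun acc sentence =>
      let s := PySem.Str.strip sentence
      if PySem.Str.len s < 20 then acc
      else
        let sentence_lower := PySem.Str.lower s
        if pvIndicators.any (fun term => PySem.Str.isIn term sentence_lower) then acc ++ [s]
        else acc) acc = acc ++ pvCollect sents := by
  induction sents generalizing acc with
  | nil => simp [pvCollect]
  | cons raw rest ih =>
    rw [List.foldl_cons, ih]
    rw [pvStepA, pvCollect_cons, List.append_assoc]

theorem pvGoB_spec (qterms : List String) (sents : List String) (fl : Option String) :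
    pvGoB qterms fl sents =
      match (pvCollect sents).find? (pvQPred qterms) with
      | some s => pvClip s
      | none =>
        match fl with
        | some f => pvClip f
        | none =>
          match pvCollect sents with
          | [] => ""
          | g :: _ => pvClip g := by
  induction sents generalizing fl with
  | nil => cases fl <;> rfl
  | cons raw rest ih =>
    rw [pvGoB]
    dsimp only
    by_cases h1 : PySem.Str.len (PySem.Str.strip raw) < 20
    · have hn : pvLegal? raw = none := by
        simp only [pvLegal?]; rw [if_pos h1]
      rw [if_pos h1, pvCollect_cons, hn, Option.toList_none, List.nil_append]
      exact ih fl
    · rw [if_neg h1]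
      by_cases h2 : pvIndicators.any (fun term => PySem.Str.isIn term (PySem.Str.lower (PySem.Str.strip raw))) = true
      · have hv : pvLegal? raw = some (PySem.Str.strip raw) := by
          simp only [pvLegal?]; rw [if_neg h1, if_pos h2]
        rw [if_pos h2, pvCollect_cons, hv, Option.toList_some, List.singleton_append]
        by_cases h3 : qterms.any (fun term => PySem.Str.isIn term (PySem.Str.lower (PySem.Str.strip raw))) = true
        · rw [if_pos h3, List.find?_cons_of_pos (show pvQPred qterms (PySem.Str.strip raw) = true from h3)]
        · rw [if_neg h3, List.find?_cons_of_neg (show ¬ pvQPred qterms (PySem.Str.strip raw) = true from h3)]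
          cases fl with
          | none => simpa using ih (some (PySem.Str.strip raw))
          | some f => simpa using ih (some f)
      · have hn : pvLegal? raw = none := by
          simp only [pvLegal?]; rw [if_neg h1, if_neg h2]
        rw [if_neg h2, pvCollect_cons, hn, Option.toList_none, List.nil_append]
        exact ih fl

theorem pvAlt_eq (document_content query : String) :
    extract_legal_content_py_alt document_content query =
      (match (pvCollect ((PySem.Str.split? document_content ". ").getD [])).find?
          (pvQPred (PySem.Str.split₀ (PySem.Str.lower query))) with
       | some s => pvClip s
       | none =>
         match pvCollect ((PySem.Str.split? document_content ". ").getD []) with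
         | [] => ""
         | g :: _ => pvClip g) := by
  rw [extract_legal_content_py_alt, pvGoB_spec]

-- ===== VERDICT (by name: the statement is the Claim_ definition above) =====
theorem extract_legal_content_py_spec : Claim_equal_extract_legal_content_py := by
  intro document_content query _
  show extract_legal_content_py document_content query = extract_legal_content_py_alt document_content query
  rw [pvAlt_eq]
  unfold extract_legal_content_py
  by_cases hd : document_content = ""
  · subst hd
    have h : pvCollect ((PySem.Str.split? "" ". ").getD []) = [] := by decide
    rw [h]
    simp
  · rw [if_neg hd]
    dsimp only
    rw [pvFoldA_eq_collect _ [], List.nil_append]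
    cases hc : pvCollect ((PySem.Str.split? document_content ". ").getD []) with
    | nil => rfl
    | cons first rest =>
      have hpq : (fun s => (PySem.Str.split₀ (PySem.Str.lower query)).any (fun term => PySem.Str.isIn term (PySem.Str.lower s))) = pvQPred (PySem.Str.split₀ (PySem.Str.lower query)) := rfl
      rw [hpq]
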